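-- pv_equiv track=rewrite | github.com/Magnushhoie/Wikipedia_Coordinates_Visualization | filter_coords.py | detect_coord_indices
-- ===== SOURCE A (Python) =====
-- def detect_coord_indices(row):
--     lowered = [c.strip().lower() for c in row]
--     lat_candidates = {"lat", "latitude", "lat_dd", "y", "y_coord", "ycoord"}
--     lon_candidates = {"lon", "long", "longitude", "lng", "x", "x_coord", "xcoord"}
--
--     try:
--         lat_idx = next(i for i, v in enumerate(lowered) if v in lat_candidates)
--         lon_idx = next(i for i, v in enumerate(lowered) if v in lon_candidates)
--         return lat_idx, lon_idx, True
--     except StopIteration: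
--         return 2, 3, False
-- ===== SOURCE B (Python) =====
-- def detect_coord_indices(row):
--     lat_candidates = {"lat", "latitude", "lat_dd", "y", "y_coord", "ycoord"}
--     lon_candidates = {"lon", "long", "longitude", "lng", "x", "x_coord", "xcoord"}
--     lat_idx = None
--     lon_idx = None
--     for i, c in enumerate(row):
--         v = c.strip().lower()
--         if lat_idx is None and v in lat_candidates:
--             lat_idx = i
--         if lon_idx is None and v in lon_candidates:
--             lon_idx = i
--         if lat_idx is not None and lon_idx is not None:
--             break
--     if lat_idx is not None and lon_idx is not None:
--         return lat_idx, lon_idx, True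
--     return 2, 3, False
-- ===== Notes on version B (the rewrite author's own statement) =====
-- stated objective: alternative
-- what changed: Replaced the two separate next()-based generator scans (after building a full lowered copy of the row) with a single enumerate pass that lowers each cell on the fly, records the first lat and first lon match in two accumulators, and breaks early once both are found.
import Mathlib
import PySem

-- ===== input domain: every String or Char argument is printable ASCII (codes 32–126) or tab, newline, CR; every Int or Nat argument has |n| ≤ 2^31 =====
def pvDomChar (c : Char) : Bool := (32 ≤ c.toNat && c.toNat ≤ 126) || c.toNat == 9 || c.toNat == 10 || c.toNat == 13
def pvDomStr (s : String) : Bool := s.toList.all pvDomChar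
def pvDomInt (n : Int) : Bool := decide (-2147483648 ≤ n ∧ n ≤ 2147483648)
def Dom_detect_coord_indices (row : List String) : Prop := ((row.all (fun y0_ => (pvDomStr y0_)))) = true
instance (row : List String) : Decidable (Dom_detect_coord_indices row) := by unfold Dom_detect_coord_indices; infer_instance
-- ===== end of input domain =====

-- B replaces A's two separate first-match generator scans over a precomputed lowered list
-- with a single enumerate pass carrying two optional accumulators and an early break (alternative decomposition).

-- ===== PORT A =====
def pvLatCands : List String := ["lat", "latitude", "lat_dd", "y", "y_coord", "ycoord"]
def pvLonCands : List String := ["lon", "long", "longitude", "lng", "x", "x_coord", "xcoord"]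

-- next(i for i, v in enumerate(lowered) if v in cands): first index whose value is in cands
def pvFirstIdx (cands : List String) (l : List String) (i : Int) : Option Int :=
  match l with
  | [] => none
  | v :: rest => if v ∈ cands then some i else pvFirstIdx cands rest (i + 1)

def detect_coord_indices (row : List String) : Int × Int × Bool :=
  let lowered := row.map (fun c => PySem.Str.lower (PySem.Str.strip c))
  match pvFirstIdx pvLatCands lowered 0, pvFirstIdx pvLonCands lowered 0 with
  | some lat_idx, some lon_idx => (lat_idx, lon_idx, true)
  | _, _ => (2, 3, false)

-- ===== PORT B =====
def pvLatCandsB : PySem.Set String := PySem.Set.ofList ["lat", "latitude", "lat_dd", "y", "y_coord", "ycoord"]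
def pvLonCandsB : PySem.Set String := PySem.Set.ofList ["lon", "long", "longitude", "lng", "x", "x_coord", "xcoord"]

-- single pass: lower each cell on the fly, set each accumulator on its first match, break when both set
def pvScan (l : List String) (i : Int) (la lo : Option Int) : Option Int × Option Int :=
  match l with
  | [] => (la, lo)
  | c :: rest =>
    let v := PySem.Str.lower (PySem.Str.strip c)
    let la' := if la.isNone && PySem.Set.contains pvLatCandsB v then some i else la
    let lo' := if lo.isNone && PySem.Set.contains pvLonCandsB v then some i else lo
    if la'.isSome && lo'.isSome then (la', lo')
    else pvScan rest (i + 1) la' lo'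

def detect_coord_indices_alt (row : List String) : Int × Int × Bool :=
  let r := pvScan row 0 none none
  if r.1.isSome && r.2.isSome then (r.1.getD 0, r.2.getD 0, true)
  else (2, 3, false)

-- ===== PRECONDITION & SPEC =====
def Spec_detect_coord_indices (row : List String) (out : Int × Int × Bool) : Prop := out = detect_coord_indices_alt row
instance (row : List String) (out : Int × Int × Bool) : Decidable (Spec_detect_coord_indices row out) := by unfold Spec_detect_coord_indices; infer_instance

-- ===== CLAIM (what is proved, stated in full; the proofs are below) =====
def Claim_equal_detect_coord_indices : Prop := ∀ (row : List String), Dom_detect_coord_indices row → Spec_detect_coord_indices row (detect_coord_indices row)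

-- ===== LEMMAS AND PROOFS =====

-- invariant of B's early-breaking scan: each component is the accumulator if already set,
-- else the first match of the corresponding candidate set in the (lowered) remainder
theorem pvScan_eq (l : List String) (i : Int) (la lo : Option Int) :
    pvScan l i la lo =
      (la.or (pvFirstIdx pvLatCands (l.map (fun c => PySem.Str.lower (PySem.Str.strip c))) i),
       lo.or (pvFirstIdx pvLonCands (l.map (fun c => PySem.Str.lower (PySem.Str.strip c))) i)) := by
  induction l generalizing i la lo with
  | nil =>
    simp only [pvScan]
    cases la <;> cases lo <;> simp [pvFirstIdx, Option.or]
  | cons c rest ih =>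
    have hB1 : pvLatCandsB = pvLatCands := by decide
    have hB2 : pvLonCandsB = pvLonCands := by decide
    simp only [pvScan, List.map_cons, pvFirstIdx]
    cases la <;> cases lo <;>
      by_cases hla : PySem.Str.lower (PySem.Str.strip c) ∈ pvLatCands <;>
      by_cases hlo : PySem.Str.lower (PySem.Str.strip c) ∈ pvLonCands <;>
      simp [hla, hlo, ih, Option.or, hB1, hB2, PySem.Set.contains]

-- ===== VERDICT (by name: the statement is the Claim_ definition above) =====
theorem detect_coord_indices_spec : Claim_equal_detect_coord_indices := by
  intro row _
  unfold Spec_detect_coord_indices detect_coord_indices detect_coord_indices_alt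
  rw [pvScan_eq]
  rcases h1 : pvFirstIdx pvLatCands (row.map (fun c => PySem.Str.lower (PySem.Str.strip c))) 0 with _ | la <;>
    rcases h2 : pvFirstIdx pvLonCands (row.map (fun c => PySem.Str.lower (PySem.Str.strip c))) 0 with _ | lo <;>
    simp [h1, h2, Option.or]
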